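-- pv_equiv track=rewrite | github.com/MrBanc/analysis | static/asm_code_utils.py | __contains_reg
-- ===== SOURCE A (Python) =====
-- registers = {'eax':  {'rax','eax','ax','al'},
--              'ebx':  {'rbx','ebx','bx','bl'},
--              'ecx':  {'rcx','ecx','cx','cl'},
--              'edx':  {'rdx','edx','dx','dl'},
--              'esi':  {'rsi','esi','si','sil'},
--              'edi':  {'rdi','edi','di','dil'},
--              'ebp':  {'rbp','ebp','bp','bpl'},
--              'esp':  {'rsp','esp','sp','spl'},
--              'r8d':  {'r8','r8d','r8w','r8b'},
--              'r9d':  {'r9','r9d','r9w','r9b'},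
--              'r10d': {'r10','r10d','r10w','r10b'},
--              'r11d': {'r11','r11d','r11w','r11b'},
--              'r12d': {'r12','r12d','r12w','r12b'},
--              'r13d': {'r13','r13d','r13w','r13b'},
--              'r14d': {'r14','r14d','r14w','r14b'},
--              'r15d': {'r15','r15d','r15w','r15b'}}
--
-- def __contains_reg(string):
--     """Returns true if the given string contains the name of a (x86_64 general
--     purpose) register identifier.
--
--     Parameters
--     ----------
--     string : str
--         the string that may contain a register identifier
--
--     Returns
--     -------
--     is_reg : bool
--         True if the string contains a register identifier
--     """
--
--     if not isinstance(string, str):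
--         return False
--
--     for reg_ids in registers.values():
--         for identifier in reg_ids:
--             if identifier in string:
--                 return True
--
--     return False
-- ===== SOURCE B (Python) =====
-- # B: single left-to-right scan over the string; at each position check its
-- # 2/3/4-char prefix against a precomputed hash set of all 64 register names,
-- # instead of running 64 separate substring searches over the whole string.
-- _REG_NAMES = frozenset([
--     'rax', 'eax', 'ax', 'al', 'rbx', 'ebx', 'bx', 'bl',
--     'rcx', 'ecx', 'cx', 'cl', 'rdx', 'edx', 'dx', 'dl',
--     'rsi', 'esi', 'si', 'sil', 'rdi', 'edi', 'di', 'dil',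
--     'rbp', 'ebp', 'bp', 'bpl', 'rsp', 'esp', 'sp', 'spl',
--     'r8', 'r8d', 'r8w', 'r8b', 'r9', 'r9d', 'r9w', 'r9b',
--     'r10', 'r10d', 'r10w', 'r10b', 'r11', 'r11d', 'r11w', 'r11b',
--     'r12', 'r12d', 'r12w', 'r12b', 'r13', 'r13d', 'r13w', 'r13b',
--     'r14', 'r14d', 'r14w', 'r14b', 'r15', 'r15d', 'r15w', 'r15b',
-- ])
--
-- def __contains_reg(string):
--     if not isinstance(string, str):
--         return False
--     return any(string[i:i + n] in _REG_NAMES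
--                for i in range(len(string)) for n in (2, 3, 4))
-- ===== Notes on version B (the rewrite author's own statement) =====
-- stated objective: alternative
-- what changed: Instead of running 64 sequential substring scans (one per register name) over the whole string, B makes a single left-to-right pass over the string and checks the 2/3/4-character slice starting at each position against one precomputed hash set of all 64 register names.
import Mathlib
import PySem

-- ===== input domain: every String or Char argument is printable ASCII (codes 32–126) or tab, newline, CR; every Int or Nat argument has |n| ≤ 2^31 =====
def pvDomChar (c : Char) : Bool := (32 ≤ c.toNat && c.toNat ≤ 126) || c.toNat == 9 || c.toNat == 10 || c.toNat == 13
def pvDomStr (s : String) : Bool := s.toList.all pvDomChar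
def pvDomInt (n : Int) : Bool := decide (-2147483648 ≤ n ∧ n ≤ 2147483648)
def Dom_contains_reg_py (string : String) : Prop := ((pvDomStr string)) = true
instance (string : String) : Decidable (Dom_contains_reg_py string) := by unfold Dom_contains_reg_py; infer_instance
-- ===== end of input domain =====

-- B replaces A's 64 sequential substring scans by one left-to-right pass that hash-checks
-- the 2/3/4-char slice at each position against a precomputed set of all register names
-- (objective: alternative single-pass algorithm; same result, proved equal).

-- ===== PORT A =====
-- the module-level `registers` dict (values are sets of register identifiers)
def pvRegisters : PySem.Dict String (PySem.Set String) :=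
  PySem.Dict.ofList
    [("eax",  PySem.Set.ofList ["rax", "eax", "ax", "al"]),
     ("ebx",  PySem.Set.ofList ["rbx", "ebx", "bx", "bl"]),
     ("ecx",  PySem.Set.ofList ["rcx", "ecx", "cx", "cl"]),
     ("edx",  PySem.Set.ofList ["rdx", "edx", "dx", "dl"]),
     ("esi",  PySem.Set.ofList ["rsi", "esi", "si", "sil"]),
     ("edi",  PySem.Set.ofList ["rdi", "edi", "di", "dil"]),
     ("ebp",  PySem.Set.ofList ["rbp", "ebp", "bp", "bpl"]),
     ("esp",  PySem.Set.ofList ["rsp", "esp", "sp", "spl"]),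
     ("r8d",  PySem.Set.ofList ["r8", "r8d", "r8w", "r8b"]),
     ("r9d",  PySem.Set.ofList ["r9", "r9d", "r9w", "r9b"]),
     ("r10d", PySem.Set.ofList ["r10", "r10d", "r10w", "r10b"]),
     ("r11d", PySem.Set.ofList ["r11", "r11d", "r11w", "r11b"]),
     ("r12d", PySem.Set.ofList ["r12", "r12d", "r12w", "r12b"]),
     ("r13d", PySem.Set.ofList ["r13", "r13d", "r13w", "r13b"]),
     ("r14d", PySem.Set.ofList ["r14", "r14d", "r14w", "r14b"]),
     ("r15d", PySem.Set.ofList ["r15", "r15d", "r15w", "r15b"])]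

-- the `isinstance(string, str)` guard is vacuous here (the argument is a String);
-- CPython iterates each set in hash order, but the returned Bool does not depend on the
-- iteration order, so the sets are iterated in literal order.
def contains_reg_py (string : String) : Bool :=
  pvRegisters.values.any (fun reg_ids =>
    reg_ids.any (fun identifier => PySem.Str.isIn identifier string))

-- ===== PORT B =====
-- B's precomputed frozenset of all 64 register identifiers
def pvRegNames : PySem.Set String :=
  PySem.Set.ofList
    ["rax", "eax", "ax", "al", "rbx", "ebx", "bx", "bl",
     "rcx", "ecx", "cx", "cl", "rdx", "edx", "dx", "dl",
     "rsi", "esi", "si", "sil", "rdi", "edi", "di", "dil",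
     "rbp", "ebp", "bp", "bpl", "rsp", "esp", "sp", "spl",
     "r8", "r8d", "r8w", "r8b", "r9", "r9d", "r9w", "r9b",
     "r10", "r10d", "r10w", "r10b", "r11", "r11d", "r11w", "r11b",
     "r12", "r12d", "r12w", "r12b", "r13", "r13d", "r13w", "r13b",
     "r14", "r14d", "r14w", "r14b", "r15", "r15d", "r15w", "r15b"]

def contains_reg_py_alt (string : String) : Bool :=
  (PySem.List.pyRange 0 (PySem.Str.len string) 1).any (fun i =>
    ([2, 3, 4] : List Int).any (fun n =>
      pvRegNames.contains (PySem.Str.slice string (some i) (some (i + n)))))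

-- ===== PRECONDITION & SPEC =====
def Spec_contains_reg_py (string : String) (out : Bool) : Prop := out = contains_reg_py_alt string
instance (string : String) (out : Bool) : Decidable (Spec_contains_reg_py string out) := by unfold Spec_contains_reg_py; infer_instance

-- ===== CLAIM (what is proved, stated in full; the proofs are below) =====
def Claim_equal_contains_reg_py : Prop := ∀ (string : String), Dom_contains_reg_py string → Spec_contains_reg_py string (contains_reg_py string)

-- ===== LEMMAS AND PROOFS =====

-- A's nested iteration over the dict's value-sets visits exactly B's flat name set
set_option maxRecDepth 8192 in
theorem pvRegValues_flat : pvRegisters.values.flatMap (fun x => x) = pvRegNames := by decide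

-- every register name has length 2, 3 or 4
set_option maxRecDepth 8192 in
theorem pvRegNames_len : ∀ id ∈ pvRegNames,
    id.toList.length = 2 ∨ id.toList.length = 3 ∨ id.toList.length = 4 := by decide

theorem pvSlice_take (s : String) (i n : Int) (hi : 0 ≤ i) (hn : 0 ≤ n) :
    (PySem.Str.slice s (some i) (some (i + n))).toList
      = (s.toList.drop i.toNat).take n.toNat := by
  obtain ⟨k, rfl⟩ : ∃ k : Nat, i = (k : Int) := ⟨i.toNat, (Int.toNat_of_nonneg hi).symm⟩
  obtain ⟨m, rfl⟩ : ∃ m : Nat, n = (m : Int) := ⟨n.toNat, (Int.toNat_of_nonneg hn).symm⟩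
  simp [PySem.Str.toList_slice, PySem.Chars.slice_eq_listSlice, PySem.List.slice_natCast_add]

theorem contains_reg_py_eq_alt (s : String) :
    contains_reg_py s = contains_reg_py_alt s := by
  have hA : contains_reg_py s
      = pvRegNames.any (fun identifier => PySem.Str.isIn identifier s) := by
    rw [← pvRegValues_flat, List.any_flatMap]; rfl
  rw [hA, contains_reg_py_alt, Bool.eq_iff_iff]
  simp only [List.any_eq_true, PySem.Str.isIn_iff_infix, PySem.Set.contains_iff,
    PySem.List.mem_pyRange_one, PySem.Str.len_eq]
  constructor
  · rintro ⟨id, hid, s₁, s₂, hcat⟩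
    have hks : s.toList = s₁ ++ (id.toList ++ s₂) := by
      rw [← hcat]; simp [List.append_assoc]
    have hdrop : (s.toList.drop s₁.length) = id.toList ++ s₂ := by
      rw [hks, List.drop_left]
    have htake : (s.toList.drop s₁.length).take id.toList.length = id.toList := by
      rw [hdrop, List.take_left]
    have hlen := pvRegNames_len id hid
    have hslen : s.toList.length = s₁.length + (id.toList.length + s₂.length) := by
      rw [hks]; simp
    refine ⟨(s₁.length : Int), ⟨by positivity, ?_⟩,
            (id.toList.length : Int), ?_, ?_⟩
    · exact_mod_cast (by omega : s₁.length < s.toList.length)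
    · rcases hlen with h | h | h <;> rw [h] <;> simp
    · have : (PySem.Str.slice s (some (s₁.length : Int))
          (some ((s₁.length : Int) + (id.toList.length : Int)))).toList = id.toList := by
        rw [pvSlice_take s _ _ (by positivity) (by positivity)]
        simpa using htake
      rw [String.toList_inj.mp this]; exact hid
  · rintro ⟨i, ⟨hi0, _⟩, n, hn, hmem⟩
    have hn0 : 0 ≤ n := by
      simp only [List.mem_cons, List.not_mem_nil, or_false] at hn
      rcases hn with rfl | rfl | rfl <;> norm_num
    refine ⟨_, hmem, ?_⟩
    rw [pvSlice_take s i n hi0 hn0]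
    exact ((s.toList.drop i.toNat).take_prefix n.toNat).isInfix.trans
      (s.toList.drop_suffix i.toNat).isInfix

-- ===== VERDICT (by name: the statement is the Claim_ definition above) =====
theorem contains_reg_py_spec : Claim_equal_contains_reg_py := by
  intro s _
  unfold Spec_contains_reg_py
  exact contains_reg_py_eq_alt s
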